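-- pv_equiv track=rewrite | github.com/jin-ryu/Algorithm-Team-Notes | Backjoon/Solved/(1292)쉽게푸는문제.py | make_arr
-- ===== SOURCE A (Python) =====
-- def make_arr(n):
--     arr = []
--     num = 1
--
--     while len(arr) < n:
--         if len(arr) + num < n:
--             arr += [num for i in range(num)]
--         else:
--             arr += [num for i in range(n - len(arr))]
--         num += 1
--
--     return arr
-- ===== SOURCE B (Python) =====
-- def make_arr(n):
--     def root(j):
--         # smallest k >= 1 with k*(k+1)//2 >= j  (binary search, exact)
--         lo, hi = 1, j
--         while lo < hi:
--             mid = (lo + hi) // 2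
--             if mid * (mid + 1) // 2 >= j:
--                 hi = mid
--             else:
--                 lo = mid + 1
--         return lo
--     return [root(j) for j in range(1, n + 1)]
-- ===== Notes on version B (the rewrite author's own statement) =====
-- stated objective: alternative
-- what changed: Replaces the sequential block-appending loop with a per-index map: each 1-based position j is sent directly to the least k with k(k+1)/2 >= j, found by exact integer binary search.
import Mathlib
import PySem

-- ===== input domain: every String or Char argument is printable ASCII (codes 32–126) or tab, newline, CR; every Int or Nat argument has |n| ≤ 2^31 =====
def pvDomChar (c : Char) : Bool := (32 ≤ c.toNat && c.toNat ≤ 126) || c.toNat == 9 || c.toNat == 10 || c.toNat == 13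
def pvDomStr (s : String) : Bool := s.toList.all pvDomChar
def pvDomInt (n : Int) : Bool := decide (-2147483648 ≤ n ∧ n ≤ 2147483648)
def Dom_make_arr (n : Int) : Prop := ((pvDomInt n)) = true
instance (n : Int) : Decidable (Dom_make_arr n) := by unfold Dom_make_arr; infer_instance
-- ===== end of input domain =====

-- B replaces A's sequential block-appending loop by mapping each 1-based position j
-- directly to the least k with k(k+1)//2 ≥ j, found by exact integer binary search (alternative decomposition).

-- ===== PORT A =====
-- A's while-loop as fuel recursion; fuel n.toNat+1 bounds the iteration count (each pass appends ≥ 1 element).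
def make_arr_loop : Nat → Int → List Int → Int → List Int
  | 0, _, arr, _ => arr
  | fuel + 1, n, arr, num =>
    if (arr.length : Int) < n then
      if (arr.length : Int) + num < n then
        make_arr_loop fuel n (arr ++ (PySem.List.pyRange 0 num 1).map (fun _ => num)) (num + 1)
      else
        make_arr_loop fuel n (arr ++ (PySem.List.pyRange 0 (n - (arr.length : Int)) 1).map (fun _ => num)) (num + 1)
    else arr

def make_arr (n : Int) : List Int := make_arr_loop (n.toNat + 1) n [] 1

-- ===== PORT B =====
-- binary search of Source B's root: smallest k in [lo, hi] with k*(k+1)//2 ≥ j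
def make_arr_root_go (j lo hi : Int) : Int :=
  if h : lo < hi then
    if j ≤ PySem.Int.floordiv (PySem.Int.floordiv (lo + hi) 2 * (PySem.Int.floordiv (lo + hi) 2 + 1)) 2 then
      make_arr_root_go j lo (PySem.Int.floordiv (lo + hi) 2)
    else
      make_arr_root_go j (PySem.Int.floordiv (lo + hi) 2 + 1) hi
  else lo
termination_by (hi - lo).toNat
decreasing_by
  · rw [PySem.Int.floordiv_eq_ediv_of_pos (by norm_num)]; omega
  · rw [PySem.Int.floordiv_eq_ediv_of_pos (by norm_num)]; omega

def make_arr_alt (n : Int) : List Int :=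
  (PySem.List.pyRange 1 (n + 1) 1).map (fun j => make_arr_root_go j 1 j)

-- ===== PRECONDITION & SPEC =====
def Spec_make_arr (n : Int) (out : List Int) : Prop := out = make_arr_alt n
instance (n : Int) (out : List Int) : Decidable (Spec_make_arr n out) := by unfold Spec_make_arr; infer_instance

-- ===== CLAIM (what is proved, stated in full; the proofs are below) =====
def Claim_equal_make_arr : Prop := ∀ (n : Int), Dom_make_arr n → Spec_make_arr n (make_arr n)

-- ===== LEMMAS AND PROOFS =====

/-- triangular number k(k+1)//2, as the ports compute it -/
def triI (k : Int) : Int := PySem.Int.floordiv (k * (k + 1)) 2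

theorem two_triI (k : Int) : 2 * triI k = k * (k + 1) := by
  unfold triI
  rw [PySem.Int.floordiv_eq_ediv_of_pos (by norm_num)]
  rcases Int.even_or_odd k with ⟨m, hm⟩ | ⟨m, hm⟩
  · subst hm
    have h2 : (m + m) * ((m + m) + 1) = 2 * (m * (m + m + 1)) := by ring
    rw [h2, Int.mul_ediv_cancel_left _ (by norm_num)]
  · subst hm
    have h2 : (2 * m + 1) * ((2 * m + 1) + 1) = 2 * ((2 * m + 1) * (m + 1)) := by ring
    rw [h2, Int.mul_ediv_cancel_left _ (by norm_num)]

theorem triI_mono {a b : Int} (ha : 0 ≤ a) (hab : a ≤ b) : triI a ≤ triI b := by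
  have h1 := two_triI a
  have h2 := two_triI b
  nlinarith

theorem triI_succ (k : Int) : triI k = triI (k - 1) + k := by
  have h1 := two_triI k
  have h2 := two_triI (k - 1)
  nlinarith

theorem triI_zero : triI 0 = 0 := by
  have := two_triI 0
  norm_num at this
  omega

theorem root_go_spec : ∀ (j lo hi : Int), 1 ≤ lo → lo ≤ hi → triI (lo - 1) < j → j ≤ triI hi →
    1 ≤ make_arr_root_go j lo hi ∧ triI (make_arr_root_go j lo hi - 1) < j ∧
      j ≤ triI (make_arr_root_go j lo hi) := by
  intro j lo hi
  induction lo, hi using make_arr_root_go.induct j with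
  | case1 lo hi h hc ih =>
    intro h1 hlh hlow hhigh
    rw [make_arr_root_go, dif_pos h, if_pos hc]
    have hm := PySem.Int.floordiv_eq_ediv_of_pos (a := lo + hi) (b := 2) (by norm_num)
    exact ih h1 (by omega) hlow hc
  | case2 lo hi h hc ih =>
    intro h1 hlh hlow hhigh
    rw [make_arr_root_go, dif_pos h, if_neg hc]
    have hm := PySem.Int.floordiv_eq_ediv_of_pos (a := lo + hi) (b := 2) (by norm_num)
    refine ih (by omega) (by omega) ?_ hhigh
    simpa [triI] using hc
  | case3 lo hi h =>
    intro h1 hlh hlow hhigh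
    rw [make_arr_root_go, dif_neg h]
    have : lo = hi := by omega
    exact ⟨h1, hlow, this ▸ hhigh⟩

theorem root_eq (j k : Int) (hk : 1 ≤ k) (hlow : triI (k - 1) < j) (hhigh : j ≤ triI k) :
    make_arr_root_go j 1 j = k := by
  have htk1 := two_triI (k - 1)
  have hj1 : 1 ≤ j := by nlinarith
  have hjt : j ≤ triI j := by
    have := two_triI j
    nlinarith
  obtain ⟨hr1, hr2, hr3⟩ := root_go_spec j 1 j le_rfl hj1 (by simpa [triI_zero] using hj1) hjt
  set r := make_arr_root_go j 1 j with hr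
  rcases lt_trichotomy r k with h | h | h
  · have := triI_mono (a := r) (b := k - 1) (by omega) (by omega)
    omega
  · exact h
  · have := triI_mono (a := k) (b := r - 1) (by omega) (by omega)
    omega

theorem loop_exit (fuel : Nat) (n : Int) (arr : List Int) (num : Int)
    (h : n ≤ (arr.length : Int)) : make_arr_loop fuel n arr num = arr := by
  cases fuel with
  | zero => rfl
  | succ f => rw [make_arr_loop, if_neg (by omega)]

theorem loop_spec : ∀ (fuel : Nat) (n num : Int) (arr : List Int),
    1 ≤ num → (arr.length : Int) = triI (num - 1) → n ≤ (arr.length : Int) + fuel →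
    make_arr_loop fuel n arr num
      = arr ++ (PySem.List.pyRange ((arr.length : Int) + 1) (n + 1) 1).map
          (fun j => make_arr_root_go j 1 j) := by
  intro fuel
  induction fuel with
  | zero =>
    intro n num arr h1 h2 h3
    rw [PySem.List.pyRange_one_eq_nil (by push_cast at h3 ⊢; omega)]
    simp [make_arr_loop]
  | succ f ih =>
    intro n num arr h1 h2 h3
    by_cases hc : (arr.length : Int) < n
    · rw [make_arr_loop, if_pos hc]
      by_cases hc2 : (arr.length : Int) + num < n
      · rw [if_pos hc2]
        have hblen : (((arr ++ (PySem.List.pyRange 0 num 1).map (fun _ => num)).length : Int))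
            = (arr.length : Int) + num := by
          simp [PySem.List.length_pyRange_one]
          omega
        rw [ih n (num + 1) _ (by omega)
          (by rw [hblen]; have := triI_succ num; simp only [add_sub_cancel_right]; omega)
          (by rw [hblen]; push_cast at h3; omega)]
        rw [hblen, List.append_assoc]
        congr 1
        rw [PySem.List.pyRange_one_append ((arr.length : Int) + 1) ((arr.length : Int) + num + 1)
          (n + 1) (by omega) (by omega), List.map_append]
        congr 1
        have hconst : (PySem.List.pyRange ((arr.length : Int) + 1) ((arr.length : Int) + num + 1) 1).map
            (fun j => make_arr_root_go j 1 j)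
            = (PySem.List.pyRange ((arr.length : Int) + 1) ((arr.length : Int) + num + 1) 1).map
              (fun _ => num) := by
          apply List.map_congr_left
          intro j hj
          rw [PySem.List.mem_pyRange_one] at hj
          refine root_eq j num h1 (by omega) ?_
          have := triI_succ num
          omega
        rw [hconst]
        simp [List.map_const', PySem.List.length_pyRange_one]
      · rw [if_neg hc2]
        have hblen : (((arr ++ (PySem.List.pyRange 0 (n - (arr.length : Int)) 1).map
            (fun _ => num)).length : Int)) = n := by
          simp [PySem.List.length_pyRange_one]
          omega
        rw [loop_exit f n _ (num + 1) (by omega)]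
        congr 1
        have hconst : (PySem.List.pyRange ((arr.length : Int) + 1) (n + 1) 1).map
            (fun j => make_arr_root_go j 1 j)
            = (PySem.List.pyRange ((arr.length : Int) + 1) (n + 1) 1).map (fun _ => num) := by
          apply List.map_congr_left
          intro j hj
          rw [PySem.List.mem_pyRange_one] at hj
          refine root_eq j num h1 (by omega) ?_
          have := triI_succ num
          omega
        rw [hconst]
        simp [List.map_const', PySem.List.length_pyRange_one]
    · rw [make_arr_loop, if_neg hc, PySem.List.pyRange_one_eq_nil (by omega)]
      simp

-- ===== VERDICT (by name: the statement is the Claim_ definition above) =====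
theorem make_arr_spec : Claim_equal_make_arr := by
  intro n _
  unfold Spec_make_arr make_arr make_arr_alt
  have h := loop_spec (n.toNat + 1) n 1 [] le_rfl (by simp [triI_zero]) (by simp; omega)
  simpa using h
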